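-- pv_equiv track=rewrite | github.com/vegarsti/image-to-table-web | api.py | find_index_of_n_largest
-- ===== SOURCE A (Python) =====
-- def find_index_of_n_largest(items, n):
--     # assume items is sorted list with positive numbers of diffs
--     indexes = []
--     copied_items = [i for i in items]
--     while len(indexes) < n - 1:
--         if len(copied_items) == 0:
--             break
--         else:
--             max_index = copied_items.index(max(copied_items))
--             indexes.append(max_index)
--             copied_items = [i for i in copied_items]
--             copied_items[max_index] = 0
--     return sorted([i + 1 for i in indexes])
-- ===== SOURCE B (Python) =====
-- def find_index_of_n_largest(items, n):
--     # i+1 is in the answer iff fewer than n-1 items beat item i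
--     # (j beats i if items[j] > items[i], or ties with a smaller index)
--     k = n - 1
--     result = []
--     for i, v in enumerate(items):
--         beats = sum(1 for j, w in enumerate(items) if w > v or (w == v and j < i))
--         if beats < k:
--             result.append(i + 1)
--     return result
-- ===== Notes on version B (the rewrite author's own statement) =====
-- stated objective: alternative
-- what changed: Replaces A's destructive select-the-max-and-zero-it loop with a single rank computation: index i is kept iff fewer than n-1 items beat it (larger value, or equal value at a smaller index), which also emits the result already in ascending order with no final sort.
-- intended difference: When n-1 exceeds the number of strictly positive items (and the list is nonempty, excluding the n=2 all-nonpositive case), A's zeroing trick re-selects already-zeroed positions and returns n-1 indexes with duplicates (e.g. A([5],3)=[1,1]); B returns the distinct indexes of the n-1 largest items ([1]), which is the intended behaviour per A's own comment assuming positive items. — e.g. on find_index_of_n_largest([5], 3): A returns [1, 1], B returns [1]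
import Mathlib
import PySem

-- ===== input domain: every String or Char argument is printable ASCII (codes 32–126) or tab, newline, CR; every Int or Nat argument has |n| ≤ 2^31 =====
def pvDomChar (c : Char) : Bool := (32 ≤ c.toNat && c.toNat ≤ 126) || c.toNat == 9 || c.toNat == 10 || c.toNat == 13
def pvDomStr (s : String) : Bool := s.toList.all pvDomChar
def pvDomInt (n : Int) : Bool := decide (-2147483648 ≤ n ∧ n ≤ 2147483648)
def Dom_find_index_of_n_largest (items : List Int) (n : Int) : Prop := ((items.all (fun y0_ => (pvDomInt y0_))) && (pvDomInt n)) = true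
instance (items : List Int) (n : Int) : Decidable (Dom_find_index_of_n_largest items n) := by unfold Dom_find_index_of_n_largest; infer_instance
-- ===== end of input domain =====

-- B replaces A's select-max-and-zero loop by a rank count per index; A=B outside D_ (see D_ comment).

-- ===== PORT A =====
-- the while loop: state (copied_items, indexes); each step appends one index, so
-- (n - 1 - len(indexes)).toNat decreases
-- each iteration appends one index, so the loop runs at most (n-1).toNat times:
-- that count is the structural fuel; the loop's own guard is checked unchanged
def pvLoopA (n : Int) : Nat → List Int → List Int → List Int
  | 0, _, indexes => indexes
  | fuel + 1, copied, indexes =>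
    if (indexes.length : Int) < n - 1 then
      if copied.length = 0 then indexes
      else
        match PySem.List.max? copied (fun y => y) with
        | none => indexes        -- unreachable: copied ≠ []
        | some mx =>
          match PySem.List.index? copied mx with
          | none => indexes      -- unreachable: mx ∈ copied
          | some maxIdx =>
            pvLoopA n fuel (copied.set maxIdx 0) (indexes ++ [(maxIdx : Int)])
    else indexes

def find_index_of_n_largest (items : List Int) (n : Int) : List Int :=
  let indexes := pvLoopA n (n - 1).toNat (items.map (fun i => i)) []
  PySem.List.sorted (indexes.map (fun i => i + 1)) (fun x => x) false

-- ===== PORT B =====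
-- beats = sum(1 for j, w in enumerate(items) if w > v or (w == v and j < i))
def pvBeats (items : List Int) (i v : Int) : Int :=
  (((PySem.List.enumerate items 0).countP
      (fun q => decide (v < q.2 ∨ (q.2 = v ∧ q.1 < i)))) : Int)

def find_index_of_n_largest_alt (items : List Int) (n : Int) : List Int :=
  (PySem.List.enumerate items 0).foldl
    (fun result q => if pvBeats items q.1 q.2 < n - 1 then result ++ [q.1 + 1] else result) []

-- ===== PRECONDITION & SPEC =====
-- When n-1 exceeds the number of strictly positive items (nonempty list; excluding the
-- n=2 all-nonpositive case), A re-selects already-zeroed positions and returns n-1 indexes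
-- with duplicates (A([5],3)=[1,1]); B returns the distinct indexes of the n-1 largest items
-- ([1]), the intended behaviour per A's own comment assuming positive items.
def D_find_index_of_n_largest (items : List Int) (n : Int) : Prop :=
  items ≠ [] ∧ ((items.countP (fun v => decide (0 < v)) : Int) < n - 1) ∧
    ¬(items.countP (fun v => decide (0 < v)) = 0 ∧ n = 2)
instance (items : List Int) (n : Int) : Decidable (D_find_index_of_n_largest items n) := by
  unfold D_find_index_of_n_largest; infer_instance

def Spec_find_index_of_n_largest (items : List Int) (n : Int) (out : List Int) : Prop :=
  ¬ D_find_index_of_n_largest items n → out = find_index_of_n_largest_alt items n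
instance (items : List Int) (n : Int) (out : List Int) : Decidable (Spec_find_index_of_n_largest items n out) := by
  unfold Spec_find_index_of_n_largest; infer_instance

def pvDiffWitness_find_index_of_n_largest : List Int × Int := ([5], 3)
def pvDiffWitnessOut_find_index_of_n_largest : (List Int) × (List Int) := ([1, 1], [1])

-- ===== CLAIM (what is proved, stated in full; the proofs are below) =====
def Claim_unchanged_find_index_of_n_largest : Prop := ∀ (items : List Int) (n : Int), Dom_find_index_of_n_largest items n → Spec_find_index_of_n_largest items n (find_index_of_n_largest items n)
def Claim_changed_find_index_of_n_largest : Prop := Dom_find_index_of_n_largest (pvDiffWitness_find_index_of_n_largest.1) (pvDiffWitness_find_index_of_n_largest.2) ∧ D_find_index_of_n_largest (pvDiffWitness_find_index_of_n_largest.1) (pvDiffWitness_find_index_of_n_largest.2) ∧ find_index_of_n_largest (pvDiffWitness_find_index_of_n_largest.1) (pvDiffWitness_find_index_of_n_largest.2) = pvDiffWitnessOut_find_index_of_n_largest.1 ∧ find_index_of_n_largest_alt (pvDiffWitness_find_index_of_n_largest.1) (pvDiffWitness_find_index_of_n_largest.2) = pvDiffWitnessOut_find_index_of_n_largest.2 ∧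 pvDiffWitnessOut_find_index_of_n_largest.1 ≠ pvDiffWitnessOut_find_index_of_n_largest.2

-- ===== LEMMAS AND PROOFS =====
def pvSel : Nat → List Int → List Int
  | 0, _ => []
  | f + 1, xs =>
    match PySem.List.max? xs (fun y => y) with
    | none => []
    | some mx =>
      match PySem.List.index? xs mx with
      | none => []
      | some i => (i : Int) :: pvSel f (xs.set i 0)

theorem pvLoopA_eq_sel (f : Nat) : ∀ (n : Int) (copied indexes : List Int),
    (n - 1 - (indexes.length : Int)).toNat = f →
    pvLoopA n f copied indexes = indexes ++ pvSel f copied := by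
  induction f with
  | zero =>
    intro n copied indexes h
    simp [pvLoopA, pvSel]
  | succ f ih =>
    intro n copied indexes h
    rw [pvLoopA]
    have hlt : ((indexes.length : Int) < n - 1) := by omega
    simp only [hlt, if_true]
    by_cases hc : copied.length = 0
    · have : copied = [] := List.length_eq_zero_iff.mp hc
      subst this
      simp [pvSel, PySem.List.max?]
    · simp only [hc, if_false]
      have hne : copied ≠ [] := by simpa [List.length_eq_zero_iff] using hc
      obtain ⟨mx, hm⟩ := Option.ne_none_iff_exists'.mp
        (fun h0 => hne ((PySem.List.max?_eq_none_iff copied (fun y => y)).mp h0))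
      have hmem : mx ∈ copied := PySem.List.max?_mem hm
      obtain ⟨i, hi⟩ := Option.ne_none_iff_exists'.mp
        (fun h0 => ((PySem.List.index?_eq_none_iff copied mx).mp h0) hmem)
      simp only [hm, hi]
      rw [ih n (copied.set i 0) (indexes ++ [(i : Int)]) (by simp; omega), pvSel]
      simp only [PySem.List.index?_eq_idxOf?] at hi
      simp [hm, hi]

def pvRk (xs : List Int) (i v : Int) : Nat :=
  (PySem.List.enumerate xs 0).countP (fun q => decide (v < q.2 ∨ (q.2 = v ∧ q.1 < i)))

theorem pvArgmax_facts {xs : List Int} {mx : Int} {i₀ : Nat}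
    (hm : PySem.List.max? xs (fun y => y) = some mx)
    (hi : PySem.List.index? xs mx = some i₀) :
    ∃ _h : i₀ < xs.length, xs[i₀] = mx ∧ (∀ y ∈ xs, y ≤ mx) ∧ ∀ j (hj : j < i₀), xs[j] ≠ mx := by
  obtain ⟨hk, hv, hfirst⟩ := PySem.List.getElem_of_index?_eq_some hi
  exact ⟨hk, hv, fun y hy => PySem.List.max?_isMax hm y hy, hfirst⟩

theorem pvMem_enum {xs : List Int} {q : Int × Int} :
    q ∈ PySem.List.enumerate xs 0 ↔ ∃ (k : Nat) (h : k < xs.length), q = ((k : Int), xs[k]) := by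
  rw [PySem.List.mem_enumerate_iff]
  constructor
  · rintro ⟨k, h, rfl⟩; exact ⟨k, h, by simp⟩
  · rintro ⟨k, h, rfl⟩; exact ⟨k, h, by simp⟩

theorem pvRk_argmax_zero {xs : List Int} {mx : Int} {i₀ : Nat}
    (hm : PySem.List.max? xs (fun y => y) = some mx)
    (hi : PySem.List.index? xs mx = some i₀) :
    pvRk xs (i₀ : Int) mx = 0 := by
  obtain ⟨hk, hv, hmax, hfirst⟩ := pvArgmax_facts hm hi
  rw [pvRk, List.countP_eq_zero]
  intro q hq
  obtain ⟨k, h, rfl⟩ := pvMem_enum.mp hq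
  simp only [decide_eq_true_eq, not_or]
  constructor
  · exact not_lt.mpr (hmax xs[k] (List.getElem_mem h))
  · rintro ⟨hkv, hlt⟩
    have : k < i₀ := by exact_mod_cast hlt
    exact hfirst k this hkv

theorem pvRk_zero_unique {xs : List Int} {mx : Int} {i₀ : Nat}
    (hm : PySem.List.max? xs (fun y => y) = some mx)
    (hi : PySem.List.index? xs mx = some i₀)
    {k : Nat} (hk : k < xs.length) (h0 : pvRk xs (k : Int) xs[k] = 0) : k = i₀ := by
  obtain ⟨hl, hv, hmax, hfirst⟩ := pvArgmax_facts hm hi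
  rw [pvRk, List.countP_eq_zero] at h0
  have hmem : ((i₀ : Int), mx) ∈ PySem.List.enumerate xs 0 := pvMem_enum.mpr ⟨i₀, hl, by rw [hv]⟩
  have hnb := h0 _ hmem
  simp only [decide_eq_true_eq, not_or, not_and, not_lt] at hnb
  obtain ⟨h1, h2⟩ := hnb
  -- h1 : ¬ xs[k] < mx  →  xs[k] = mx
  have hle : xs[k] ≤ mx := hmax _ (List.getElem_mem hk)
  have heq : xs[k] = mx := le_antisymm hle h1
  have h3 : (k : Int) ≤ (i₀ : Int) := h2 heq.symm
  have hki : k ≤ i₀ := by exact_mod_cast h3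
  rcases Nat.lt_or_ge k i₀ with hlt | hge
  · exact absurd heq (hfirst k hlt)
  · omega

theorem pvEnum_set (xs : List Int) (i : Nat) (v : Int) :
    PySem.List.enumerate (xs.set i v) 0 = (PySem.List.enumerate xs 0).set i ((i : Int), v) := by
  apply List.ext_getElem?
  intro j
  rw [List.getElem?_set, PySem.List.getElem?_enumerate, PySem.List.getElem?_enumerate,
    PySem.List.length_enumerate]
  by_cases hij : i = j
  · subst hij
    by_cases hl : i < xs.length
    · simp [hl, List.getElem?_eq_getElem]
    · simp [hl, List.getElem?_eq_none, Nat.le_of_not_lt]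
  · simp [hij]

theorem pvCountP_pos_of_mem {l : List (Int × Int)} {p : Int × Int → Bool} {x : Int × Int}
    (hx : x ∈ l) (hp : p x = true) : 0 < l.countP p :=
  List.countP_pos_iff.mpr ⟨x, hx, hp⟩

theorem pvRk_set_shift {xs : List Int} {mx : Int} {i₀ : Nat}
    (hm : PySem.List.max? xs (fun y => y) = some mx)
    (hi : PySem.List.index? xs mx = some i₀)
    {k : Nat} (hk : k < xs.length) (hne : k ≠ i₀) (hpos : 0 < xs[k]) :
    pvRk (xs.set i₀ 0) (k : Int) xs[k] + 1 = pvRk xs (k : Int) xs[k] := by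
  obtain ⟨hl, hv, hmax, hfirst⟩ := pvArgmax_facts hm hi
  have hlen : i₀ < (PySem.List.enumerate xs 0).length := by
    rw [PySem.List.length_enumerate]; exact hl
  have hE : (PySem.List.enumerate xs 0)[i₀] = ((i₀ : Int), mx) := by
    rw [PySem.List.getElem_enumerate]; simp [hv]
  have hA : decide (xs[k] < mx ∨ (mx = xs[k] ∧ (i₀ : Int) < (k : Int))) = true := by
    simp only [decide_eq_true_eq]
    rcases lt_or_eq_of_le (hmax xs[k] (List.getElem_mem hk)) with h | h
    · exact Or.inl h
    · refine Or.inr ⟨h.symm, ?_⟩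
      have : i₀ < k := by
        rcases Nat.lt_or_ge i₀ k with h1 | h1
        · exact h1
        · rcases Nat.lt_or_ge k i₀ with h2 | h2
          · exact absurd h (hfirst k h2)
          · omega
      exact_mod_cast this
  have hB : decide (xs[k] < (0 : Int) ∨ ((0 : Int) = xs[k] ∧ (i₀ : Int) < (k : Int))) = false := by
    simp only [decide_eq_false_iff_not]
    rintro (h | ⟨h, -⟩) <;> omega
  have hpos' : 0 < (PySem.List.enumerate xs 0).countP
      (fun q => decide (xs[k] < q.2 ∨ (q.2 = xs[k] ∧ q.1 < (k : Int)))) := by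
    refine pvCountP_pos_of_mem (hE ▸ List.getElem_mem hlen) ?_
    exact hA
  rw [pvRk, pvRk, pvEnum_set, List.countP_set hlen, hE]
  dsimp only
  rw [hA, hB]
  simp only [Bool.false_eq_true, if_true, if_false]
  simp only [pvRk] at hpos'
  omega

theorem pvPos_eq_countP_enum (xs : List Int) :
    xs.countP (fun v => decide (0 < v)) =
      (PySem.List.enumerate xs 0).countP (fun q => decide (0 < q.2)) := by
  conv_lhs => rw [← PySem.List.map_snd_enumerate xs 0]
  rw [List.countP_map]
  rfl

theorem pvPos_le_rk {xs : List Int} {k : Nat} (hk : k < xs.length) (hnp : xs[k] ≤ 0) :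
    xs.countP (fun v => decide (0 < v)) ≤ pvRk xs (k : Int) xs[k] := by
  rw [pvPos_eq_countP_enum, pvRk]
  apply List.countP_mono_left
  intro q hq hqp
  simp only [decide_eq_true_eq] at hqp ⊢
  exact Or.inl (by omega)

theorem pvPos_set {xs : List Int} {i₀ : Nat} (h : i₀ < xs.length) (hpos : 0 < xs[i₀]) :
    (xs.set i₀ 0).countP (fun v => decide (0 < v)) + 1 = xs.countP (fun v => decide (0 < v)) := by
  have h1 : 0 < xs.countP (fun v => decide (0 < v)) :=
    List.countP_pos_iff.mpr ⟨xs[i₀], List.getElem_mem h, by simpa using hpos⟩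
  rw [List.countP_set h]
  simp [hpos]
  omega

def pvPos (xs : List Int) : Nat := xs.countP (fun v => decide (0 < v))

theorem pvSel_char (k : Nat) : ∀ (xs : List Int), k ≤ pvPos xs →
    (pvSel k xs).Nodup ∧ (∀ x ∈ pvSel k xs, ∃ j : Nat, x = (j : Int)) ∧
      ∀ j : Nat, ((j : Int) ∈ pvSel k xs ↔ ∃ _h : j < xs.length, pvRk xs (j : Int) xs[j] < k) := by
  induction k with
  | zero => intro xs _; simp [pvSel]
  | succ k ih =>
    intro xs hk
    -- xs has a positive element, so it is nonempty with a positive max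
    have hpos0 : 0 < pvPos xs := by omega
    obtain ⟨y, hy, hyp⟩ := List.countP_pos_iff.mp hpos0
    have hne : xs ≠ [] := by rintro rfl; simp at hy
    obtain ⟨mx, hm⟩ := Option.ne_none_iff_exists'.mp
      (fun h0 => hne ((PySem.List.max?_eq_none_iff xs (fun y => y)).mp h0))
    have hmem : mx ∈ xs := PySem.List.max?_mem hm
    obtain ⟨i₀, hi⟩ := Option.ne_none_iff_exists'.mp
      (fun h0 => ((PySem.List.index?_eq_none_iff xs mx).mp h0) hmem)
    obtain ⟨hl, hv, hmax, hfirst⟩ := pvArgmax_facts hm hi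
    have hmxpos : 0 < mx := by
      have := PySem.List.max?_isMax hm y hy
      simp only [decide_eq_true_eq] at hyp
      omega
    have hsel : pvSel (k + 1) xs = (i₀ : Int) :: pvSel k (xs.set i₀ 0) := by
      rw [pvSel, hm]; dsimp only; rw [hi]
    have hps : k ≤ pvPos (xs.set i₀ 0) := by
      have := pvPos_set hl (hv ▸ hmxpos)
      unfold pvPos at *
      omega
    obtain ⟨ihnd, ihcast, ihmem⟩ := ih (xs.set i₀ 0) hps
    have hnotin : (i₀ : Int) ∉ pvSel k (xs.set i₀ 0) := by
      intro hin
      obtain ⟨h', hr⟩ := (ihmem i₀).mp hin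
      have hz : (xs.set i₀ 0)[i₀] = 0 := by simp [List.getElem_set_self]
      have := pvPos_le_rk (xs := xs.set i₀ 0) (k := i₀) h' (by rw [hz])
      unfold pvPos at hps
      rw [hz] at this hr
      omega
    refine ⟨?_, ?_, ?_⟩
    · rw [hsel]; exact List.nodup_cons.mpr ⟨hnotin, ihnd⟩
    · rw [hsel]
      intro x hx
      rw [List.mem_cons] at hx
      rcases hx with rfl | hx
      · exact ⟨i₀, rfl⟩
      · exact ihcast x hx
    · intro j
      rw [hsel, List.mem_cons]
      constructor
      · rintro (hj | hj)
        · have : j = i₀ := by exact_mod_cast hj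
          subst this
          exact ⟨hl, by rw [hv, pvRk_argmax_zero hm hi]; omega⟩
        · obtain ⟨h', hr⟩ := (ihmem j).mp hj
          have h'' : j < xs.length := by simpa using h'
          have hjne : j ≠ i₀ := by
            rintro rfl
            have hz : (xs.set j 0)[j] = 0 := by simp [List.getElem_set_self]
            have := pvPos_le_rk (xs := xs.set j 0) (k := j) h' (by rw [hz])
            unfold pvPos at hps
            rw [hz] at this hr
            omega
          have hjpos : 0 < xs[j] := by
            by_contra hle
            push_neg at hle
            have hset : (xs.set i₀ 0)[j] = xs[j] := List.getElem_set_ne (by omega) _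
            have := pvPos_le_rk (xs := xs.set i₀ 0) (k := j) h' (by rw [hset]; exact hle)
            rw [hset] at this hr
            unfold pvPos at hps
            omega
          have hset : (xs.set i₀ 0)[j] = xs[j] := List.getElem_set_ne (by omega) _
          rw [hset] at hr
          have := pvRk_set_shift hm hi h'' hjne hjpos
          exact ⟨h'', by omega⟩
      · rintro ⟨h', hr⟩
        by_cases hj0 : pvRk xs (j : Int) xs[j] = 0
        · left
          have := pvRk_zero_unique hm hi h' hj0
          exact_mod_cast congrArg (Nat.cast : Nat → Int) this
        · right
          have hji : j ≠ i₀ := by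
            rintro rfl
            rw [hv, pvRk_argmax_zero hm hi] at hj0
            exact hj0 rfl
          have hjpos : 0 < xs[j] := by
            by_contra hle
            push_neg at hle
            have := pvPos_le_rk h' hle
            unfold pvPos at hk
            omega
          have hshift := pvRk_set_shift hm hi h' hji hjpos
          refine (ihmem j).mpr ⟨by simpa using h', ?_⟩
          have hset : (xs.set i₀ 0)[j]'(by simpa using h') = xs[j] := List.getElem_set_ne (by omega) _
          rw [hset]
          omega

theorem pvSel_one_char (xs : List Int) (hne : xs ≠ []) :
    (pvSel 1 xs).Nodup ∧ (∀ x ∈ pvSel 1 xs, ∃ j : Nat, x = (j : Int)) ∧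
      ∀ j : Nat, ((j : Int) ∈ pvSel 1 xs ↔ ∃ _h : j < xs.length, pvRk xs (j : Int) xs[j] < 1) := by
  obtain ⟨mx, hm⟩ := Option.ne_none_iff_exists'.mp
    (fun h0 => hne ((PySem.List.max?_eq_none_iff xs (fun y => y)).mp h0))
  have hmem : mx ∈ xs := PySem.List.max?_mem hm
  obtain ⟨i₀, hi⟩ := Option.ne_none_iff_exists'.mp
    (fun h0 => ((PySem.List.index?_eq_none_iff xs mx).mp h0) hmem)
  obtain ⟨hl, hv, hmax, hfirst⟩ := pvArgmax_facts hm hi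
  have hsel : pvSel 1 xs = [(i₀ : Int)] := by
    rw [pvSel, hm]; dsimp only; rw [hi]; rfl
  refine ⟨by rw [hsel]; simp, ?_, ?_⟩
  · rw [hsel]
    intro x hx
    rw [List.mem_singleton] at hx
    exact ⟨i₀, hx⟩
  intro j
  rw [hsel, List.mem_singleton]
  constructor
  · intro hj
    have : j = i₀ := by exact_mod_cast hj
    subst this
    exact ⟨hl, by rw [hv, pvRk_argmax_zero hm hi]; omega⟩
  · rintro ⟨h', hr⟩
    have hj0 : pvRk xs (j : Int) xs[j] = 0 := by omega
    have := pvRk_zero_unique hm hi h' hj0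
    exact_mod_cast congrArg (Nat.cast : Nat → Int) this

theorem pvSel_nil (f : Nat) : pvSel f [] = [] := by
  cases f <;> simp [pvSel, PySem.List.max?]

theorem pvFold (items : List Int) (c : Int) :
    ∀ (l : List (Int × Int)) (acc : List Int),
      l.foldl (fun result q => if pvBeats items q.1 q.2 < c then result ++ [q.1 + 1] else result) acc
        = acc ++ (l.filter (fun q => decide (pvBeats items q.1 q.2 < c))).map (fun q => q.1 + 1) := by
  intro l
  induction l with
  | nil => intro acc; simp
  | cons q t ih =>
    intro acc
    by_cases hq : pvBeats items q.1 q.2 < c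
    · simp [List.foldl_cons, hq, ih, List.filter_cons]
    · simp [List.foldl_cons, hq, ih, List.filter_cons]

theorem pvAlt_eq_filter (items : List Int) (n : Int) :
    find_index_of_n_largest_alt items n =
      ((PySem.List.enumerate items 0).filter
        (fun q => decide ((pvRk items q.1 q.2 : Int) < n - 1))).map (fun q => q.1 + 1) := by
  rw [find_index_of_n_largest_alt, pvFold]
  rfl

theorem pvFinal (xs : List Int) (n : Int) (picks : List Int)
    (hnd : picks.Nodup) (hcast : ∀ x ∈ picks, ∃ j : Nat, x = (j : Int))
    (hch : ∀ j : Nat, ((j : Int) ∈ picks ↔ ∃ _h : j < xs.length, pvRk xs (j : Int) xs[j] < (n - 1).toNat))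
    (hn : 1 ≤ n - 1) :
    PySem.List.sorted (picks.map (fun i => i + 1)) (fun x => x) false =
      find_index_of_n_largest_alt xs n := by
  rw [pvAlt_eq_filter]
  apply PySem.List.sorted_id_eq_of_perm_of_pairwise
  · -- permutation
    rw [List.perm_ext_iff_of_nodup]
    · intro a
      rw [List.mem_map, List.mem_map]
      constructor
      · rintro ⟨q, hq, rfl⟩
        rw [List.mem_filter] at hq
        obtain ⟨hqe, hqp⟩ := hq
        obtain ⟨j, h, rfl⟩ := pvMem_enum.mp hqe
        refine ⟨j, (hch j).mpr ⟨h, ?_⟩, rfl⟩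
        simp only [decide_eq_true_eq] at hqp
        omega
      · rintro ⟨x, hx, rfl⟩
        obtain ⟨j, rfl⟩ := hcast x hx
        obtain ⟨h, hr⟩ := (hch j).mp hx
        refine ⟨((j : Int), xs[j]), ?_, rfl⟩
        rw [List.mem_filter]
        refine ⟨pvMem_enum.mpr ⟨j, h, rfl⟩, ?_⟩
        simp only [decide_eq_true_eq]
        omega
    · -- nodup of the filter-map: fst strictly increasing
      have h1 : ((PySem.List.enumerate xs 0).filter
          (fun q => decide ((pvRk xs q.1 q.2 : Int) < n - 1))).Pairwise (fun p q => p.1 < q.1) :=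
        (PySem.List.pairwise_lt_enumerate xs 0).filter _
      have h2 := h1.map (f := fun q => q.1 + 1) (fun {p q} h => by omega : ∀ {p q : Int × Int}, p.1 < q.1 → p.1 + 1 < q.1 + 1)
      exact h2.imp (fun h => ne_of_lt h)
    · exact hnd.map (fun x y h => by omega)
  · -- ascending
    have h1 : ((PySem.List.enumerate xs 0).filter
        (fun q => decide ((pvRk xs q.1 q.2 : Int) < n - 1))).Pairwise (fun p q => p.1 < q.1) :=
      (PySem.List.pairwise_lt_enumerate xs 0).filter _
    exact h1.map (f := fun q => q.1 + 1) (fun {p q} h => by omega : ∀ {p q : Int × Int}, p.1 < q.1 → p.1 + 1 ≤ q.1 + 1)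

-- ===== VERDICT (by name: the statement is the Claim_ definition above) =====
theorem find_index_of_n_largest_spec : Claim_unchanged_find_index_of_n_largest := by
  unfold Claim_unchanged_find_index_of_n_largest
  intro items n _hdom
  unfold Spec_find_index_of_n_largest
  intro hnD
  unfold D_find_index_of_n_largest at hnD
  push_neg at hnD
  rw [find_index_of_n_largest]
  have hmap : items.map (fun i => i) = items := List.map_id' items
  rw [hmap]
  rw [pvLoopA_eq_sel (n - 1).toNat n items [] (by simp), List.nil_append]
  by_cases hn : n - 1 ≤ 0
  · -- no picks on either side
    have : (n - 1).toNat = 0 := by omega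
    rw [this, pvSel]
    rw [pvAlt_eq_filter]
    have : (PySem.List.enumerate items 0).filter
        (fun q => decide ((pvRk items q.1 q.2 : Int) < n - 1)) = [] := by
      apply List.filter_eq_nil_iff.mpr
      intro q _
      simp only [decide_eq_true_eq, not_lt]
      have : (0 : Int) ≤ (pvRk items q.1 q.2 : Int) := Int.natCast_nonneg _
      omega
    rw [this]
    rfl
  · push_neg at hn
    by_cases hemp : items = []
    · subst hemp
      rw [pvSel_nil]
      rw [pvAlt_eq_filter]
      rfl
    · have h1n : 1 ≤ n - 1 := by omega
      by_cases hlt : ((items.countP (fun v => decide (0 < v)) : Int) < n - 1)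
      case neg =>
        -- n - 1 ≤ #positives
        have hk : (n - 1).toNat ≤ pvPos items := by
          unfold pvPos
          omega
        obtain ⟨hnd, hcast, hch⟩ := pvSel_char (n - 1).toNat items hk
        exact pvFinal items n _ hnd hcast hch h1n
      case pos =>
        -- n = 2: one pick, no positivity needed
        obtain ⟨hp0, hn2⟩ := hnD hemp hlt
        subst hn2
        have : ((2 : Int) - 1).toNat = 1 := by norm_num
        rw [this]
        obtain ⟨hnd, hcast, hch⟩ := pvSel_one_char items hemp
        exact pvFinal items 2 _ hnd hcast (by simpa using hch) (by norm_num)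

theorem find_index_of_n_largest_changed : Claim_changed_find_index_of_n_largest := by
  unfold Claim_changed_find_index_of_n_largest; decide
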